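-- pv_equiv track=rewrite | github.com/markusbuchholz/Data-Structures-Algorithms---Udacity | P2/problem3.py | compute_numbers
-- ===== SOURCE A (Python) =====
-- def compute_numbers(data):
--     number1 = []
--     number2 = []
--
--     while data:
--
--         number1.append(data.pop())
--         if data:
--             number2.append(data.pop())
--
--     # for i in range (len(data)):
--     #     number1.append(data[2*i])
--     #     number2.append(data[2*i+1])
--
--     return number1, number2
-- ===== SOURCE B (Python) =====
-- def compute_numbers(data):
--     rev = data[::-1]
--     number1 = rev[0::2]
--     number2 = rev[1::2]
--     data[:] = []  # reproduce A's side effect of draining data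
--     return number1, number2
-- ===== Notes on version B (the rewrite author's own statement) =====
-- stated objective: simpler
-- what changed: A's while loop that repeatedly pops the last element and appends alternately into two lists is replaced by one reversal plus two strided slices (even and odd positions of the reversed list); data is drained in place by a slice assignment instead of repeated pop().
import Mathlib
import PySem

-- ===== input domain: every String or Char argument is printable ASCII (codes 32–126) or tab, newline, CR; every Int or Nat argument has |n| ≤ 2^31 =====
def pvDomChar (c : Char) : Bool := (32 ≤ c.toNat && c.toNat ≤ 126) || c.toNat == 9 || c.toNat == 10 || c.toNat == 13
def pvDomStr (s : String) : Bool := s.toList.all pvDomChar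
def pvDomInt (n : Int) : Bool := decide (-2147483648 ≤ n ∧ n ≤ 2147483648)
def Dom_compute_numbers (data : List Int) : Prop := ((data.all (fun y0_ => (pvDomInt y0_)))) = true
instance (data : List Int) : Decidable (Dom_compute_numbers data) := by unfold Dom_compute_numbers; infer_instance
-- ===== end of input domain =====

-- B replaces A's pop-from-the-end while loop by one reversal plus two strided slices (objective:
-- simpler). Both Pythons drain `data` in place (A by pop(), B by `data[:] = []`); the theorem below
-- is about the returned pair only.

-- ===== PORT A =====
-- while data: number1.append(data.pop()); if data: number2.append(data.pop())
def computeLoopA (data n1 n2 : List Int) : List Int × List Int :=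
  match h : PySem.List.pop? data (-1) with
  | none => (n1, n2)
  | some (x, rest) =>
    match h2 : PySem.List.pop? rest (-1) with
    | none => computeLoopA rest (n1 ++ [x]) n2
    | some (y, rest2) => computeLoopA rest2 (n1 ++ [x]) (n2 ++ [y])
termination_by data.length
decreasing_by
  · have := PySem.List.length_of_pop?_eq_some data h; simp at this; omega
  · have h3 := PySem.List.length_of_pop?_eq_some data h
    have h4 := PySem.List.length_of_pop?_eq_some rest h2
    simp at h3 h4; omega

def compute_numbers (data : List Int) : List Int × List Int :=
  computeLoopA data [] []

-- ===== PORT B =====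
-- rev = data[::-1]; number1 = rev[0::2]; number2 = rev[1::2]
def compute_numbers_alt (data : List Int) : List Int × List Int :=
  let rev := (PySem.List.slice? data none none (-1)).getD []
  let number1 := (PySem.List.slice? rev (some 0) none 2).getD []
  let number2 := (PySem.List.slice? rev (some 1) none 2).getD []
  (number1, number2)

-- ===== PRECONDITION & SPEC =====
def Spec_compute_numbers (data : List Int) (out : List Int × List Int) : Prop := out = compute_numbers_alt data
instance (data : List Int) (out : List Int × List Int) : Decidable (Spec_compute_numbers data out) := by unfold Spec_compute_numbers; infer_instance

-- ===== CLAIM (what is proved, stated in full; the proofs are below) =====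
def Claim_equal_compute_numbers : Prop := ∀ (data : List Int), Dom_compute_numbers data → Spec_compute_numbers data (compute_numbers data)

-- ===== LEMMAS AND PROOFS =====

-- proof-side model: split a list into its even- and odd-indexed elements
def pvDeint : List Int → List Int × List Int
  | [] => ([], [])
  | x :: t => ((x :: (pvDeint t).2), (pvDeint t).1)

theorem pvDeint_getElem? (xs : List Int) (k : Nat) :
    (pvDeint xs).1[k]? = xs[2 * k]? ∧ (pvDeint xs).2[k]? = xs[2 * k + 1]? := by
  induction xs generalizing k with
  | nil => simp [pvDeint]
  | cons x t ih =>
    constructor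
    · cases k with
      | zero => simp [pvDeint]
      | succ k =>
        have hidx : 2 * (k + 1) = (2 * k + 1) + 1 := by omega
        simp only [pvDeint]
        rw [List.getElem?_cons_succ, (ih k).2, hidx, List.getElem?_cons_succ]
    · simp only [pvDeint]
      rw [(ih k).1, show 2 * k + 1 = (2 * k) + 1 from rfl, List.getElem?_cons_succ]

-- a filterMap of in-range lookups over a range is a map
theorem fm_map (xs : List Int) (g : Nat → Nat) (c : Nat) (h : ∀ k, k < c → g k < xs.length) :
    List.filterMap (fun k => xs[g k]?) (List.range c)
      = (List.range c).map (fun k => xs.getD (g k) 0) := by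
  induction c with
  | zero => simp
  | succ c ih =>
    rw [List.range_succ, List.filterMap_append, List.map_append,
        ih (fun k hk => h k (by omega))]
    simp [List.getElem?_eq_getElem (h c (by omega))]

theorem fm_evens (xs : List Int) (c : Nat) (hc : ∀ k, k < c ↔ 2 * k < xs.length) :
    List.filterMap (fun k => xs[2 * k]?) (List.range c) = (pvDeint xs).1 := by
  rw [fm_map xs (fun k => 2 * k) c (fun k hk => (hc k).1 hk)]
  apply List.ext_getElem?
  intro k
  rw [(pvDeint_getElem? xs k).1]
  by_cases hk : k < c
  · have hlt := (hc k).1 hk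
    simp [hk, List.getElem?_eq_getElem hlt]
  · have hge : ¬ 2 * k < xs.length := fun hlt => hk ((hc k).2 hlt)
    have h1 : (List.range c)[k]? = none := List.getElem?_eq_none_iff.2 (by simpa using hk)
    have h2 : xs[2 * k]? = none := List.getElem?_eq_none_iff.2 (by omega)
    simp [h1, h2]

theorem fm_odds (xs : List Int) (c : Nat) (hc : ∀ k, k < c ↔ 2 * k + 1 < xs.length) :
    List.filterMap (fun k => xs[2 * k + 1]?) (List.range c) = (pvDeint xs).2 := by
  rw [fm_map xs (fun k => 2 * k + 1) c (fun k hk => (hc k).1 hk)]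
  apply List.ext_getElem?
  intro k
  rw [(pvDeint_getElem? xs k).2]
  by_cases hk : k < c
  · have hlt := (hc k).1 hk
    simp [hk, List.getElem?_eq_getElem hlt]
  · have hge : ¬ 2 * k + 1 < xs.length := fun hlt => hk ((hc k).2 hlt)
    have h1 : (List.range c)[k]? = none := List.getElem?_eq_none_iff.2 (by simpa using hk)
    have h2 : xs[2 * k + 1]? = none := List.getElem?_eq_none_iff.2 (by omega)
    simp [h1, h2]

theorem slice2_zero (xs : List Int) :
    PySem.List.slice? xs (some 0) none 2 = some (pvDeint xs).1 := by
  rcases xs with _ | ⟨x, t⟩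
  · rfl
  · simp only [PySem.List.slice?, PySem.List.sliceIndices]
    norm_num
    have hmin : min (0 : Int) (↑t.length + 1) = 0 := by omega
    have hidx : ∀ k : Nat, ((0 : Int) + 2 * (k : Int)).toNat = 2 * k := by intro k; omega
    simp only [hmin, hidx]
    rw [show ((↑t.length + 1 - 0 + 2 - 1 : Int) / 2).toNat = (t.length + 2) / 2 by omega]
    exact fm_evens (x :: t) _ (fun k => by simp; omega)

theorem slice2_one (xs : List Int) :
    PySem.List.slice? xs (some 1) none 2 = some (pvDeint xs).2 := by
  rcases xs with _ | ⟨x, t⟩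
  · rfl
  · simp only [PySem.List.slice?, PySem.List.sliceIndices]
    norm_num
    have hidx : ∀ k : Nat, ((1 : Int) + 2 * (k : Int)).toNat = 2 * k + 1 := by intro k; omega
    simp only [hidx]
    rw [show (if 0 < t.length then ((↑t.length + 2 - 1 : Int) / 2).toNat else 0)
          = (t.length + 1) / 2 by split_ifs <;> omega]
    exact fm_odds (x :: t) _ (fun k => by simp; omega)

theorem pop?_neg_one_none (xs : List Int) (h : PySem.List.pop? xs (-1) = none) : xs = [] := by
  induction xs using List.reverseRecOn with
  | nil => rfl
  | append_singleton ys y _ => rw [PySem.List.pop?_last] at h; cases h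

theorem pop?_neg_one_some (xs : List Int) (x : Int) (rest : List Int)
    (h : PySem.List.pop? xs (-1) = some (x, rest)) : xs = rest ++ [x] := by
  induction xs using List.reverseRecOn with
  | nil => cases h
  | append_singleton ys y _ =>
    rw [PySem.List.pop?_last] at h
    simp only [Option.some.injEq, Prod.mk.injEq] at h
    rw [h.1, h.2]

theorem loopA_deint_len (n : Nat) : ∀ (data n1 n2 : List Int), data.length = n →
    computeLoopA data n1 n2 =
      (n1 ++ (pvDeint data.reverse).1, n2 ++ (pvDeint data.reverse).2) := by
  induction n using Nat.strong_induction_on with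
  | _ n ih =>
    intro data n1 n2 hn
    rw [computeLoopA]
    split
    · next h =>
      rw [pop?_neg_one_none data h]
      simp [pvDeint]
    · next x rest h =>
      have hd := pop?_neg_one_some data x rest h
      split
      · next h2 =>
        have hr := pop?_neg_one_none rest h2
        subst hr
        have hn1 : data.length = 1 := by rw [hd]; rfl
        rw [ih 0 (by omega) [] (n1 ++ [x]) n2 rfl]
        subst hd
        simp [pvDeint]
      · next y rest2 h2 =>
        have hr := pop?_neg_one_some rest y rest2 h2
        subst hr
        have hn2 : data.length = rest2.length + 2 := by rw [hd]; simp
        rw [ih rest2.length (by omega) rest2 (n1 ++ [x]) (n2 ++ [y]) rfl]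
        subst hd
        simp [pvDeint]

theorem loopA_deint (data n1 n2 : List Int) :
    computeLoopA data n1 n2 =
      (n1 ++ (pvDeint data.reverse).1, n2 ++ (pvDeint data.reverse).2) :=
  loopA_deint_len data.length data n1 n2 rfl

-- ===== VERDICT (by name: the statement is the Claim_ definition above) =====
theorem compute_numbers_spec : Claim_equal_compute_numbers := by
  intro data _
  show compute_numbers data = compute_numbers_alt data
  unfold compute_numbers compute_numbers_alt
  rw [PySem.List.slice?_none_none_neg_one]
  simp only [Option.getD_some]
  rw [slice2_zero, slice2_one]
  simp only [Option.getD_some]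
  rw [loopA_deint]
  simp
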